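-- pv_equiv track=rewrite | github.com/hernanmaldonado/ML_HernanMaldonado | CLI/nameGen.py | trackfunc
-- ===== SOURCE A (Python) =====
-- def trackfunc(new_words,size):
--     tracking=dict()
--     for word in new_words:
--         for i,j in list(zip(range(size), range(1,size))):
--             poschri=str(i)+word[i]
--             poschrj=str(j)+word[j]
--             if not poschri in tracking:
--                 tracking[poschri]=dict()
--             if poschrj in tracking[poschri]:
--                 tracking[poschri][poschrj]+=1
--             else:
--                 tracking[poschri][poschrj]=1
--     return tracking
-- ===== SOURCE B (Python) =====
-- def trackfunc(new_words, size):
--     # Phase 1: flatten all words into one stream of adjacent transitions.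
--     stream = [(str(i) + w[i], str(i + 1) + w[i + 1])
--               for w in new_words
--               for i in range(size - 1)]
--     # Phase 2: the distinct transitions, in order of first occurrence.
--     order = []
--     for p in stream:
--         if p not in order:
--             order.append(p)
--     # Phase 3: assemble the nested dict, counting each transition by scanning the stream.
--     tracking = {}
--     for a, b in order:
--         tracking.setdefault(a, {})[b] = stream.count((a, b))
--     return tracking
-- ===== Notes on version B (the rewrite author's own statement) =====
-- stated objective: alternative
-- what changed: B never maintains counts while traversing: it first flattens all words into one list of transition pairs, then dedups that list to get each distinct transition in first-occurrence order, and finally builds the nested dict by counting each distinct pair with a scan (stream.count) over the flat list, instead of A's single pass with incremental nested-dict increments.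
import Mathlib
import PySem

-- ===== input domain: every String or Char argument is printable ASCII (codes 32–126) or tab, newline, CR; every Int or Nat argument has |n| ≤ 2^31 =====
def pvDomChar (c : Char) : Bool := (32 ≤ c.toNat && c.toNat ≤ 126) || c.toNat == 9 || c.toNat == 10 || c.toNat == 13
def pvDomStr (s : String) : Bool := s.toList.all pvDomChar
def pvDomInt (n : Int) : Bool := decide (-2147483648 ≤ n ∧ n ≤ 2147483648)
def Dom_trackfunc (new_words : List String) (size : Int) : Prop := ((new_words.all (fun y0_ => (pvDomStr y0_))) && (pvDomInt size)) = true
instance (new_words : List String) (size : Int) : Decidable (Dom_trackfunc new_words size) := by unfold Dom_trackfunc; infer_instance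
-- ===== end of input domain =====

-- B drops A's incremental counting entirely: it flattens all words into one flat list of
-- transition pairs, dedups it (first-occurrence order), and builds the nested dict by
-- counting each distinct pair with a scan over the flat list; equal return values are
-- proved on Pre_ (the inputs where A does not raise IndexError).

-- ===== PORT A =====
-- word[i] is PySem.List.pyGetD on word.toList: exact under Pre_ (every index 0 ≤ i < size ≤ len word).
def trackfunc (new_words : List String) (size : Int) : List (String × List (String × Int)) :=
  let tracking : PySem.Dict String (PySem.Dict String Int) :=
    new_words.foldl (fun tracking word =>
      ((PySem.List.pyRange 0 size 1).zip (PySem.List.pyRange 1 size 1)).foldl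
        (fun tracking ij =>
          let poschri : String := PySem.Int.toStr ij.1 ++ String.ofList [PySem.List.pyGetD word.toList ij.1 ' ']
          let poschrj : String := PySem.Int.toStr ij.2 ++ String.ofList [PySem.List.pyGetD word.toList ij.2 ' ']
          let tracking := if !(tracking.contains poschri) then tracking.insert poschri PySem.Dict.empty else tracking
          let inner := tracking.getD poschri PySem.Dict.empty
          if inner.contains poschrj then
            tracking.insert poschri (inner.insert poschrj (inner.getD poschrj 0 + 1))
          else
            tracking.insert poschri (inner.insert poschrj 1))
        tracking)
      PySem.Dict.empty
  tracking.items.map (fun q => (q.1, q.2.items))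

-- ===== PORT B =====
-- Phase 1: the flat comprehension over words and i in range(size-1); Phase 2: the dedup loop
-- ('if p not in order'); Phase 3: setdefault + insert with the value stream.count((a, b)).
def trackfunc_alt (new_words : List String) (size : Int) : List (String × List (String × Int)) :=
  let stream : List (String × String) :=
    new_words.flatMap (fun w =>
      (PySem.List.pyRange 0 (size - 1) 1).map (fun i =>
        (PySem.Int.toStr i ++ String.ofList [PySem.List.pyGetD w.toList i ' '],
         PySem.Int.toStr (i + 1) ++ String.ofList [PySem.List.pyGetD w.toList (i + 1) ' '])))
  let order : List (String × String) :=
    stream.foldl (fun order p => if p ∈ order then order else order ++ [p]) []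
  let tracking : PySem.Dict String (PySem.Dict String Int) :=
    order.foldl (fun tracking p =>
      let t1 := tracking.setdefault p.1 PySem.Dict.empty
      t1.insert p.1 ((t1.getD p.1 PySem.Dict.empty).insert p.2 ((PySem.List.count stream p : Int))))
      PySem.Dict.empty
  tracking.items.map (fun q => (q.1, q.2.items))

-- ===== PRECONDITION & SPEC =====
-- Pre_: when size ≥ 2 every word must have at least size characters; otherwise A raises IndexError
-- on word[i] (with size ≤ 1 the zipped range is empty and nothing is indexed).
def Pre_trackfunc (new_words : List String) (size : Int) : Prop :=
  size ≤ 1 ∨ ∀ w ∈ new_words, size ≤ (w.toList.length : Int)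
instance (new_words : List String) (size : Int) : Decidable (Pre_trackfunc new_words size) := by
  unfold Pre_trackfunc; infer_instance
def pvWitness_trackfunc : List String × Int := (["abc", "abd"], 3)
def Spec_trackfunc (new_words : List String) (size : Int) (out : List (String × List (String × Int))) : Prop := out = trackfunc_alt new_words size
instance (new_words : List String) (size : Int) (out : List (String × List (String × Int))) : Decidable (Spec_trackfunc new_words size out) := by unfold Spec_trackfunc; infer_instance

-- ===== CLAIM (what is proved, stated in full; the proofs are below) =====
def Claim_equal_trackfunc : Prop := ∀ (new_words : List String) (size : Int), Dom_trackfunc new_words size → Pre_trackfunc new_words size → Spec_trackfunc new_words size (trackfunc new_words size)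

-- ===== LEMMAS AND PROOFS =====

-- the key pair (poschri, poschrj) computed for a word at positions ij
def pvKey (word : String) (ij : Int × Int) : String × String :=
  (PySem.Int.toStr ij.1 ++ String.ofList [PySem.List.pyGetD word.toList ij.1 ' '],
   PySem.Int.toStr ij.2 ++ String.ofList [PySem.List.pyGetD word.toList ij.2 ' '])

-- A's loop body, as a function of the key pair
def pvStepA (t : PySem.Dict String (PySem.Dict String Int)) (p : String × String) :
    PySem.Dict String (PySem.Dict String Int) :=
  let t1 := if !(t.contains p.1) then t.insert p.1 PySem.Dict.empty else t
  let inner := t1.getD p.1 PySem.Dict.empty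
  if inner.contains p.2 then t1.insert p.1 (inner.insert p.2 (inner.getD p.2 0 + 1))
  else t1.insert p.1 (inner.insert p.2 1)

-- B's phase-3 loop body, as a function of a (pair, count) item
def pvStepB (t : PySem.Dict String (PySem.Dict String Int)) (q : (String × String) × Int) :
    PySem.Dict String (PySem.Dict String Int) :=
  let t1 := t.setdefault q.1.1 PySem.Dict.empty
  t1.insert q.1.1 ((t1.getD q.1.1 PySem.Dict.empty).insert q.1.2 q.2)

-- the flattened stream of key pairs (A's zip order)
def pvStream (new_words : List String) (size : Int) : List (String × String) :=
  new_words.flatMap (fun w => ((PySem.List.pyRange 0 size 1).zip (PySem.List.pyRange 1 size 1)).map (pvKey w))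

-- a dict of the shape "key list + value function"
def pvMk {K V : Type} [BEq K] (L : List K) (h : K → V) : PySem.Dict K V :=
  PySem.Dict.mk (L.map fun a => (a, h a))

-- the closed form both folds are shown equal to
def pvBs (s : List (String × String)) (a : String) : List String :=
  ((PySem.Set.ofList s).filter (fun k => k.1 == a)).map (fun k => k.2)

def pvInner (s : List (String × String)) (a : String) : PySem.Dict String Int :=
  pvMk (pvBs s a) (fun b => (s.count (a, b) : Int))

def pvG (s : List (String × String)) : PySem.Dict String (PySem.Dict String Int) :=
  pvMk (PySem.Set.ofList (s.map (fun k => k.1))) (pvInner s)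

theorem pv_foldl_flatMap {A B S : Type} (f : A → List B) (g : S → B → S) (l : List A) (init : S) :
    (l.flatMap f).foldl g init = l.foldl (fun acc x => (f x).foldl g acc) init := by
  induction l generalizing init with
  | nil => rfl
  | cons x xs ih => simp [List.flatMap_cons, List.foldl_append, ih]

theorem pv_trackfunc_eq_stream (new_words : List String) (size : Int) :
    trackfunc new_words size =
      ((pvStream new_words size).foldl pvStepA PySem.Dict.empty).items.map (fun q => (q.1, q.2.items)) := by
  unfold trackfunc pvStream
  rw [pv_foldl_flatMap]
  simp only [List.foldl_map]
  rfl

-- the zipped pair of ranges is the shifted-pair image of range(size-1)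
theorem pv_zip_range_aux (n : Nat) :
    ∀ (a b : Int), (b - a).toNat ≤ n →
    (PySem.List.pyRange a b 1).zip (PySem.List.pyRange (a + 1) b 1) =
      (PySem.List.pyRange a (b - 1) 1).map (fun i => (i, i + 1)) := by
  induction n with
  | zero =>
    intro a b h
    have hb : b ≤ a := by omega
    rw [PySem.List.pyRange_one_eq_nil hb, PySem.List.pyRange_one_eq_nil (show b ≤ a + 1 by omega),
        PySem.List.pyRange_one_eq_nil (show b - 1 ≤ a by omega)]
    simp
  | succ n ih =>
    intro a b h
    by_cases hba : b - 1 ≤ a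
    · rw [PySem.List.pyRange_one_eq_nil (show b ≤ a + 1 by omega),
          PySem.List.pyRange_one_eq_nil hba]
      simp [List.zip_nil_right]
    · have h1 : a < b := by omega
      have h2 : a + 1 < b := by omega
      rw [PySem.List.pyRange_one_cons h1, PySem.List.pyRange_one_cons h2,
          PySem.List.pyRange_one_cons (show a < b - 1 by omega)]
      rw [List.zip_cons_cons, List.map_cons]
      rw [← PySem.List.pyRange_one_cons h2, ih (a + 1) b (by omega)]

theorem pv_zip_range (a b : Int) :
    (PySem.List.pyRange a b 1).zip (PySem.List.pyRange (a + 1) b 1) =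
      (PySem.List.pyRange a (b - 1) 1).map (fun i => (i, i + 1)) :=
  pv_zip_range_aux (b - a).toNat a b le_rfl

theorem pv_zip_range0 (b : Int) :
    (PySem.List.pyRange 0 b 1).zip (PySem.List.pyRange 1 b 1) =
      (PySem.List.pyRange 0 (b - 1) 1).map (fun i => (i, i + 1)) := by
  simpa using pv_zip_range 0 b

-- B's phase-1 stream equals A's zipped stream
theorem pv_streamB_eq (new_words : List String) (size : Int) :
    (new_words.flatMap (fun w =>
      (PySem.List.pyRange 0 (size - 1) 1).map (fun i =>
        (PySem.Int.toStr i ++ String.ofList [PySem.List.pyGetD w.toList i ' '],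
         PySem.Int.toStr (i + 1) ++ String.ofList [PySem.List.pyGetD w.toList (i + 1) ' '])))) =
      pvStream new_words size := by
  unfold pvStream
  congr 1
  funext w
  rw [pv_zip_range0 size, List.map_map]
  rfl

-- B's phase-2 dedup loop is PySem.Set.ofList
theorem pv_dedup_eq_ofList {A : Type} [BEq A] [LawfulBEq A] [DecidableEq A] (l : List A) :
    l.foldl (fun order p => if p ∈ order then order else order ++ [p]) [] = PySem.Set.ofList l := by
  rw [PySem.Set.ofList_eq_foldl]
  congr 1
  funext s p
  simp [PySem.Set.add, PySem.Set.contains]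

theorem pv_trackfunc_alt_eq_stream (new_words : List String) (size : Int) :
    trackfunc_alt new_words size =
      ((PySem.Dict.counter (pvStream new_words size)).items.foldl pvStepB PySem.Dict.empty).items.map
        (fun q => (q.1, q.2.items)) := by
  simp only [trackfunc_alt]
  rw [pv_streamB_eq, pv_dedup_eq_ofList, PySem.Dict.items_counter, List.foldl_map]
  have hstep : (fun (tracking : PySem.Dict String (PySem.Dict String Int)) (p : String × String) =>
      (tracking.setdefault p.1 PySem.Dict.empty).insert p.1
        (((tracking.setdefault p.1 PySem.Dict.empty).getD p.1 PySem.Dict.empty).insert p.2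
          ((PySem.List.count (pvStream new_words size) p : Int)))) =
      (fun x y => pvStepB x (y, ((List.count y (pvStream new_words size) : Int)))) := by
    funext t p
    simp [pvStepB, PySem.List.count_eq]
  rw [hstep]

-- ---- generic facts about pvMk ----

theorem pvMk_keys {K V : Type} [BEq K] (L : List K) (h : K → V) : (pvMk L h).keys = L := by
  simp [pvMk, PySem.Dict.keys, Function.comp_def]

theorem pvMk_contains {K V : Type} [BEq K] [LawfulBEq K] [DecidableEq K] (L : List K) (h : K → V) (a : K) :
    (pvMk L h).contains a = decide (a ∈ L) := by
  rw [PySem.Dict.contains_eq_decide_mem_keys, pvMk_keys]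

theorem pvMk_getD {K V : Type} [BEq K] [LawfulBEq K] (L : List K) (h : K → V) (a : K) (d : V)
    (hL : L.Nodup) (ha : a ∈ L) : (pvMk L h).getD a d = h a := by
  apply PySem.Dict.getD_of_mem_items
  · exact List.mem_map_of_mem ha
  · rw [pvMk_keys]; exact hL

theorem pvMk_insert_mem {K V : Type} [BEq K] [LawfulBEq K] [DecidableEq K] (L : List K) (h : K → V) (a : K) (v : V)
    (ha : a ∈ L) :
    (pvMk L h).insert a v = pvMk L (fun a' => if a' = a then v else h a') := by
  have hc : (pvMk L h).contains a = true := by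
    rw [PySem.Dict.contains_iff_mem_keys, pvMk_keys]; exact ha
  apply PySem.Dict.ext
  rw [PySem.Dict.items_insert_of_contains _ _ hc]
  show (L.map fun a' => (a', h a')).map _ = L.map _
  rw [List.map_map]
  apply List.map_congr_left
  intro x _
  by_cases hx : x = a <;> simp [hx]

theorem pvMk_insert_not_mem {K V : Type} [BEq K] [LawfulBEq K] [DecidableEq K] (L : List K) (h : K → V) (a : K) (v : V)
    (ha : a ∉ L) :
    (pvMk L h).insert a v = pvMk (L ++ [a]) (fun a' => if a' = a then v else h a') := by
  have hc : (pvMk L h).contains a = false := by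
    rw [← Bool.not_eq_true, PySem.Dict.contains_iff_mem_keys, pvMk_keys]
    simpa using ha
  apply PySem.Dict.ext
  rw [PySem.Dict.items_insert_of_not_contains _ _ hc]
  show (L.map fun a' => (a', h a')) ++ [(a, v)] = (L ++ [a]).map _
  rw [List.map_append]
  congr 1
  · apply List.map_congr_left
    intro x hx
    have : x ≠ a := fun he => ha (he ▸ hx)
    simp [this]
  · simp

theorem pvMk_congr {K V : Type} [BEq K] (L : List K) (h1 h2 : K → V)
    (he : ∀ a ∈ L, h1 a = h2 a) : pvMk L h1 = pvMk L h2 := by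
  unfold pvMk
  congr 1
  apply List.map_congr_left
  intro x hx
  rw [he x hx]

-- ---- facts about pvBs ----

theorem pvBs_mem (s : List (String × String)) (a b : String) :
    b ∈ pvBs s a ↔ (a, b) ∈ s := by
  unfold pvBs
  simp only [List.mem_map, List.mem_filter, PySem.Set.mem_ofList, beq_iff_eq]
  constructor
  · rintro ⟨k, ⟨hk, hk1⟩, hk2⟩
    have : k = (a, b) := by cases k; simp_all
    exact this ▸ hk
  · intro hab
    exact ⟨(a, b), ⟨hab, rfl⟩, rfl⟩

theorem pvBs_nodup (s : List (String × String)) (a : String) : (pvBs s a).Nodup := by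
  unfold pvBs
  apply List.Nodup.map_on
  · intro x hx y hy hxy
    have hx1 : x.1 = a := by simpa using (List.mem_filter.mp hx).2
    have hy1 : y.1 = a := by simpa using (List.mem_filter.mp hy).2
    cases x; cases y; simp_all
  · exact (PySem.Set.nodup_ofList s).filter _

theorem pvBs_append_of_mem (s : List (String × String)) (p : String × String) (a : String)
    (hp : p ∈ s) : pvBs (s ++ [p]) a = pvBs s a := by
  unfold pvBs
  rw [PySem.Set.ofList_append_singleton, PySem.Set.add_of_mem (by rwa [PySem.Set.mem_ofList])]

theorem pvBs_append_fst (s : List (String × String)) (p : String × String)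
    (hp : p ∉ s) : pvBs (s ++ [p]) p.1 = pvBs s p.1 ++ [p.2] := by
  unfold pvBs
  rw [PySem.Set.ofList_append_singleton,
      PySem.Set.add_of_not_mem (by rwa [PySem.Set.mem_ofList]),
      List.filter_append, List.map_append]
  simp

theorem pvBs_append_ne (s : List (String × String)) (p : String × String) (a : String)
    (hp : p ∉ s) (hne : a ≠ p.1) : pvBs (s ++ [p]) a = pvBs s a := by
  unfold pvBs
  rw [PySem.Set.ofList_append_singleton,
      PySem.Set.add_of_not_mem (by rwa [PySem.Set.mem_ofList]),
      List.filter_append, List.map_append]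
  have : p.1 ≠ a := fun he => hne he.symm
  simp [this]

-- counts in s ++ [p]
theorem pv_count_append (s : List (String × String)) (p k : String × String) :
    ((s ++ [p]).count k : Int) = (s.count k : Int) + (if k = p then 1 else 0) := by
  rw [List.count_append]
  by_cases hk : k = p
  · subst hk; simp
  · have h0 : List.count k [p] = 0 :=
      List.count_eq_zero.mpr (fun h => hk (List.mem_singleton.mp h))
    rw [h0, if_neg hk]
    simp

-- ---- A's fold equals the closed form ----

theorem pv_inner_append_of_ne (s : List (String × String)) (p : String × String) (a : String)
    (hne : a ≠ p.1) : pvInner (s ++ [p]) a = pvInner s a := by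
  have hbs : pvBs (s ++ [p]) a = pvBs s a := by
    by_cases hp : p ∈ s
    · exact pvBs_append_of_mem s p a hp
    · exact pvBs_append_ne s p a hp hne
  unfold pvInner
  rw [hbs]
  apply pvMk_congr
  intro b _
  rw [pv_count_append]
  have hne' : (a, b) ≠ p := fun h => hne (by rw [← h])
  simp [hne']

theorem pvBs_nil_of_not_mem (s : List (String × String)) (a : String)
    (ha : a ∉ s.map (fun k => k.1)) : pvBs s a = [] := by
  unfold pvBs
  rw [List.map_eq_nil_iff, List.filter_eq_nil_iff]
  intro k hk
  have : k.1 ≠ a := fun he => ha (he ▸ List.mem_map_of_mem ((PySem.Set.mem_ofList s k).mp hk))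
  simpa using this

theorem pv_not_mem_of_fst (s : List (String × String)) (p : String × String)
    (ha : p.1 ∉ s.map (fun k => k.1)) : p ∉ s :=
  fun h => ha (List.mem_map_of_mem h)

theorem pv_foldA (s : List (String × String)) :
    s.foldl pvStepA PySem.Dict.empty = pvG s := by
  induction s using List.reverseRecOn with
  | nil => rfl
  | append_singleton s p ih =>
    obtain ⟨a, b⟩ := p
    rw [List.foldl_append, List.foldl_cons, List.foldl_nil, ih]
    simp only [pvStepA, pvG]
    rw [pvMk_contains]
    by_cases hmem : a ∈ s.map (fun k => k.1)
    · -- outer key a is already present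
      have hamem : a ∈ PySem.Set.ofList (s.map (fun k => k.1)) := (PySem.Set.mem_ofList _ _).mpr hmem
      rw [decide_eq_true ((PySem.Set.mem_ofList _ _).mpr hmem)]
      simp only [Bool.not_true, Bool.false_eq_true, if_false]
      rw [pvMk_getD _ _ _ _ (PySem.Set.nodup_ofList _) hamem]
      show (if (pvInner s a).contains b then _ else _) = _
      unfold pvInner
      rw [pvMk_contains]
      have houter : PySem.Set.ofList ((s ++ [(a, b)]).map (fun k => k.1)) =
          PySem.Set.ofList (s.map (fun k => k.1)) := by
        rw [List.map_append, List.map_cons, List.map_nil, PySem.Set.ofList_append_singleton,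
            PySem.Set.add_of_mem hamem]
      by_cases hpb : (a, b) ∈ s
      · -- the pair itself occurred before: increment
        have hb : b ∈ pvBs s a := (pvBs_mem s a b).mpr hpb
        rw [decide_eq_true hb, if_pos rfl]
        rw [pvMk_getD _ _ _ _ (pvBs_nodup s a) hb,
            pvMk_insert_mem _ _ _ _ hb, pvMk_insert_mem _ _ _ _ hamem, houter]
        apply pvMk_congr
        intro a' ha'
        by_cases haa : a' = a
        · subst haa
          rw [if_pos rfl]
          rw [pvBs_append_of_mem _ _ _ hpb]
          apply pvMk_congr
          intro b' _
          rw [pv_count_append]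
          by_cases hbb : b' = b <;> simp [hbb, Prod.ext_iff]
        · rw [if_neg haa]
          exact (pv_inner_append_of_ne s (a, b) a' haa).symm
      · -- new pair under an existing outer key: append to the inner dict
        have hb : b ∉ pvBs s a := fun h => hpb ((pvBs_mem s a b).mp h)
        rw [decide_eq_false hb]
        simp only [Bool.false_eq_true, if_false]
        rw [pvMk_insert_not_mem _ _ _ _ hb, pvMk_insert_mem _ _ _ _ hamem, houter]
        apply pvMk_congr
        intro a' ha'
        by_cases haa : a' = a
        · subst haa
          rw [if_pos rfl]
          rw [show pvBs (s ++ [(a', b)]) a' = pvBs s a' ++ [b] from pvBs_append_fst s (a', b) hpb]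
          apply pvMk_congr
          intro b' hb'
          rw [pv_count_append]
          by_cases hbb : b' = b
          · subst hbb
            rw [if_pos rfl, if_pos rfl, List.count_eq_zero.mpr hpb]
            simp
          · rw [if_neg hbb, if_neg (by simp [Prod.ext_iff, hbb])]
            simp
        · rw [if_neg haa]
          exact (pv_inner_append_of_ne s (a, b) a' haa).symm
    · -- fresh outer key a
      have hamem : a ∉ PySem.Set.ofList (s.map (fun k => k.1)) :=
        fun h => hmem ((PySem.Set.mem_ofList _ _).mp h)
      have hps : (a, b) ∉ s := pv_not_mem_of_fst s (a, b) hmem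
      rw [decide_eq_false hamem]
      simp only [Bool.not_false, if_true]
      rw [pvMk_insert_not_mem _ _ _ _ hamem]
      have hnd2 : (PySem.Set.ofList (s.map (fun k => k.1)) ++ [a]).Nodup := by
        rw [List.nodup_append]
        refine ⟨PySem.Set.nodup_ofList _, List.nodup_singleton a, ?_⟩
        intro x hx y hy
        rw [List.mem_singleton] at hy
        subst hy
        exact fun he => hamem (he ▸ hx)
      have hmem2 : a ∈ PySem.Set.ofList (s.map (fun k => k.1)) ++ [a] :=
        List.mem_append_right _ (List.mem_singleton.mpr rfl)
      rw [pvMk_getD _ _ _ _ hnd2 hmem2, if_pos rfl]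
      rw [show (PySem.Dict.empty : PySem.Dict String Int).contains b = false from rfl]
      simp only [Bool.false_eq_true, if_false]
      rw [show (PySem.Dict.empty : PySem.Dict String Int).insert b 1 = pvMk [b] (fun _ => (1 : Int)) from rfl]
      rw [pvMk_insert_mem _ _ _ _ hmem2]
      have houter : PySem.Set.ofList ((s ++ [(a, b)]).map (fun k => k.1)) =
          PySem.Set.ofList (s.map (fun k => k.1)) ++ [a] := by
        rw [List.map_append, List.map_cons, List.map_nil, PySem.Set.ofList_append_singleton,
            PySem.Set.add_of_not_mem hamem]
      rw [houter]
      apply pvMk_congr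
      intro a' ha'
      by_cases haa : a' = a
      · subst haa
        rw [if_pos rfl]
        unfold pvInner
        rw [show pvBs (s ++ [(a', b)]) a' = pvBs s a' ++ [b] from pvBs_append_fst s (a', b) hps,
            pvBs_nil_of_not_mem s a' hmem, List.nil_append]
        apply pvMk_congr
        intro b' hb'
        rw [List.mem_singleton] at hb'
        subst hb'
        rw [pv_count_append, if_pos rfl, List.count_eq_zero.mpr hps]
        simp
      · rw [if_neg haa, if_neg haa, pv_inner_append_of_ne _ _ _ haa]

-- ---- the reshape fold, on any nodup-keyed item list ----

def pvRSpec (items : List ((String × String) × Int)) : PySem.Dict String (PySem.Dict String Int) :=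
  pvMk (PySem.Set.ofList (items.map (fun q => q.1.1)))
    (fun a => pvMk ((items.filter (fun q => q.1.1 == a)).map (fun q => q.1.2))
      (fun b => (PySem.Dict.mk items).getD (a, b) 0))

theorem pv_getD_items (items : List ((String × String) × Int)) (q' : (String × String) × Int)
    (hq' : q' ∈ items) (hnd : (items.map (fun q => q.1)).Nodup) :
    (PySem.Dict.mk items).getD q'.1 0 = q'.2 := by
  apply PySem.Dict.getD_of_mem_items
  · show (q'.1, q'.2) ∈ items
    cases q'
    exact hq'
  · show (PySem.Dict.mk items).keys.Nodup
    simpa [PySem.Dict.keys] using hnd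

theorem pv_fl_mem (items : List ((String × String) × Int)) (a b : String) :
    b ∈ (items.filter (fun q => q.1.1 == a)).map (fun q => q.1.2) ↔ ∃ c, ((a, b), c) ∈ items := by
  simp only [List.mem_map, List.mem_filter, beq_iff_eq]
  constructor
  · rintro ⟨q, ⟨hq, hq1⟩, hq2⟩
    exact ⟨q.2, by rwa [show ((a, b), q.2) = q by cases q with | mk k c => cases k; simp_all]⟩
  · rintro ⟨c, hc⟩
    exact ⟨((a, b), c), ⟨hc, rfl⟩, rfl⟩

theorem pv_fl_append_ne (items : List ((String × String) × Int)) (q : (String × String) × Int)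
    (a : String) (hne : q.1.1 ≠ a) :
    (items ++ [q]).filter (fun q => q.1.1 == a) = items.filter (fun q => q.1.1 == a) := by
  rw [List.filter_append]
  simp [hne]

theorem pv_reshape (items : List ((String × String) × Int))
    (hnd : (items.map (fun q => q.1)).Nodup) :
    items.foldl pvStepB PySem.Dict.empty = pvRSpec items := by
  induction items using List.reverseRecOn with
  | nil => rfl
  | append_singleton items q ih =>
    rw [List.map_append, List.map_cons, List.map_nil, List.nodup_append] at hnd
    obtain ⟨hnd1, -, hdisj⟩ := hnd
    have hq1 : q.1 ∉ items.map (fun q => q.1) := by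
      intro h
      exact hdisj _ h _ (List.mem_singleton.mpr rfl) rfl
    have hndq : ((items ++ [q]).map (fun q => q.1)).Nodup := by
      rw [List.map_append, List.map_cons, List.map_nil, List.nodup_append]
      refine ⟨hnd1, List.nodup_singleton _, ?_⟩
      intro x hx y hy
      rw [List.mem_singleton] at hy
      subst hy
      exact fun he => hq1 (he ▸ hx)
    obtain ⟨⟨a, b⟩, c⟩ := q
    rw [List.foldl_append, List.foldl_cons, List.foldl_nil, ih hnd1]
    simp only [pvStepB, pvRSpec]
    -- value lookups in the two literal dicts agree on every key of items
    have hvalq : (PySem.Dict.mk (items ++ [((a, b), c)])).getD (a, b) 0 = c :=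
      pv_getD_items _ ((a, b), c) (List.mem_append_right _ (List.mem_singleton.mpr rfl)) hndq
    have hval : ∀ q' ∈ items,
        (PySem.Dict.mk (items ++ [((a, b), c)])).getD q'.1 0 = (PySem.Dict.mk items).getD q'.1 0 := by
      intro q' hq'
      rw [pv_getD_items items q' hq' hnd1,
          pv_getD_items _ q' (List.mem_append_left _ hq') hndq]
    by_cases ha : a ∈ items.map (fun q => q.1.1)
    · -- outer key a present: setdefault is the identity, the inner dict gains (b, c)
      have hamem : a ∈ PySem.Set.ofList (items.map (fun q => q.1.1)) :=
        (PySem.Set.mem_ofList _ _).mpr ha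
      have hc : (pvMk (PySem.Set.ofList (items.map (fun q => q.1.1)))
          (fun a => pvMk ((items.filter (fun q => q.1.1 == a)).map (fun q => q.1.2))
            (fun b => (PySem.Dict.mk items).getD (a, b) 0))).contains a = true := by
        rw [pvMk_contains, decide_eq_true hamem]
      rw [PySem.Dict.setdefault_of_contains _ _ hc]
      rw [pvMk_getD _ _ _ _ (PySem.Set.nodup_ofList _) hamem]
      have hbfl : b ∉ (items.filter (fun q => q.1.1 == a)).map (fun q => q.1.2) := by
        intro h
        obtain ⟨c', hc'⟩ := (pv_fl_mem items a b).mp h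
        exact hq1 (by simpa using List.mem_map_of_mem (f := fun q => q.1) hc')
      rw [pvMk_insert_not_mem _ _ _ _ hbfl, pvMk_insert_mem _ _ _ _ hamem]
      have houter : PySem.Set.ofList ((items ++ [((a, b), c)]).map (fun q => q.1.1)) =
          PySem.Set.ofList (items.map (fun q => q.1.1)) := by
        rw [List.map_append, List.map_cons, List.map_nil, PySem.Set.ofList_append_singleton,
            PySem.Set.add_of_mem hamem]
      rw [houter]
      apply pvMk_congr
      intro a' ha'
      by_cases haa : a' = a
      · subst haa
        rw [if_pos rfl]
        have hfl : (items ++ [((a', b), c)]).filter (fun q => q.1.1 == a') =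
            items.filter (fun q => q.1.1 == a') ++ [((a', b), c)] := by
          rw [List.filter_append]
          simp
        rw [hfl, List.map_append, List.map_cons, List.map_nil]
        apply pvMk_congr
        intro b' hb'
        rw [List.mem_append] at hb'
        rcases hb' with hb' | hb'
        · have hbb : b' ≠ b := fun he => hbfl (he ▸ hb')
          rw [if_neg hbb]
          obtain ⟨c', hc'⟩ := (pv_fl_mem items a' b').mp hb'
          exact (hval ((a', b'), c') hc').symm
        · rw [List.mem_singleton] at hb'
          subst hb'
          rw [if_pos rfl, hvalq]
      · rw [if_neg haa, pv_fl_append_ne items ((a, b), c) a' (fun h => haa h.symm)]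
        apply pvMk_congr
        intro b' hb'
        obtain ⟨c', hc'⟩ := (pv_fl_mem items a' b').mp hb'
        exact (hval ((a', b'), c') hc').symm
    · -- fresh outer key a: setdefault inserts an empty inner dict
      have hamem : a ∉ PySem.Set.ofList (items.map (fun q => q.1.1)) :=
        fun h => ha ((PySem.Set.mem_ofList _ _).mp h)
      have hc : (pvMk (PySem.Set.ofList (items.map (fun q => q.1.1)))
          (fun a => pvMk ((items.filter (fun q => q.1.1 == a)).map (fun q => q.1.2))
            (fun b => (PySem.Dict.mk items).getD (a, b) 0))).contains a = false := by
        rw [pvMk_contains, decide_eq_false hamem]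
      rw [PySem.Dict.setdefault_of_not_contains _ _ hc,
          pvMk_insert_not_mem _ _ _ _ hamem]
      have hnd2 : (PySem.Set.ofList (items.map (fun q => q.1.1)) ++ [a]).Nodup := by
        rw [List.nodup_append]
        refine ⟨PySem.Set.nodup_ofList _, List.nodup_singleton a, ?_⟩
        intro x hx y hy
        rw [List.mem_singleton] at hy
        subst hy
        exact fun he => hamem (he ▸ hx)
      have hmem2 : a ∈ PySem.Set.ofList (items.map (fun q => q.1.1)) ++ [a] :=
        List.mem_append_right _ (List.mem_singleton.mpr rfl)
      rw [pvMk_getD _ _ _ _ hnd2 hmem2, if_pos rfl]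
      rw [show (PySem.Dict.empty : PySem.Dict String Int).insert b c = pvMk [b] (fun _ => c) from rfl]
      rw [pvMk_insert_mem _ _ _ _ hmem2]
      have houter : PySem.Set.ofList ((items ++ [((a, b), c)]).map (fun q => q.1.1)) =
          PySem.Set.ofList (items.map (fun q => q.1.1)) ++ [a] := by
        rw [List.map_append, List.map_cons, List.map_nil, PySem.Set.ofList_append_singleton,
            PySem.Set.add_of_not_mem hamem]
      rw [houter]
      apply pvMk_congr
      intro a' ha'
      by_cases haa : a' = a
      · subst haa
        rw [if_pos rfl]
        have hflnil : items.filter (fun q => q.1.1 == a') = [] := by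
          rw [List.filter_eq_nil_iff]
          intro q' hq'
          simp only [beq_iff_eq]
          exact fun he => ha (he ▸ List.mem_map_of_mem (f := fun q => q.1.1) hq')
        have hfl : (items ++ [((a', b), c)]).filter (fun q => q.1.1 == a') = [((a', b), c)] := by
          rw [List.filter_append, hflnil, List.nil_append]
          simp
        rw [hfl, List.map_cons, List.map_nil]
        apply pvMk_congr
        intro b' hb'
        rw [List.mem_singleton] at hb'
        subst hb'
        rw [hvalq]
      · rw [if_neg haa, if_neg haa,
            pv_fl_append_ne items ((a, b), c) a' (fun h => haa h.symm)]
        apply pvMk_congr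
        intro b' hb'
        obtain ⟨c', hc'⟩ := (pv_fl_mem items a' b').mp hb'
        exact (hval ((a', b'), c') hc').symm

-- ---- dedup commutes with map ----

theorem pv_ofList_map_ofList {A B : Type} [BEq A] [LawfulBEq A] [BEq B] [LawfulBEq B]
    (f : A → B) (l : List A) :
    PySem.Set.ofList ((PySem.Set.ofList l).map f) = PySem.Set.ofList (l.map f) := by
  induction l using List.reverseRecOn with
  | nil => rfl
  | append_singleton l x ih =>
    rw [PySem.Set.ofList_append_singleton, PySem.Set.add_eq_ite, List.map_append,
        List.map_cons, List.map_nil, PySem.Set.ofList_append_singleton]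
    by_cases hx : x ∈ PySem.Set.ofList l
    · rw [if_pos hx, ih, PySem.Set.add_of_mem]
      simp only [PySem.Set.mem_ofList, List.mem_map]
      exact ⟨x, by rwa [PySem.Set.mem_ofList] at hx, rfl⟩
    · rw [if_neg hx, List.map_append, List.map_cons, List.map_nil,
          PySem.Set.ofList_append_singleton, ih]

-- ---- main ----

theorem pv_main (s : List (String × String)) :
    s.foldl pvStepA PySem.Dict.empty = (PySem.Dict.counter s).items.foldl pvStepB PySem.Dict.empty := by
  have hnd : ((PySem.Dict.counter s).items.map (fun q => q.1)).Nodup := by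
    simpa [PySem.Dict.keys] using PySem.Dict.nodup_keys_counter s
  rw [pv_foldA, pv_reshape _ hnd]
  unfold pvRSpec
  have hval : ∀ (a b : String),
      (PySem.Dict.mk (PySem.Dict.counter s).items).getD (a, b) 0 = (List.count (a, b) s : Int) := by
    intro a b
    exact PySem.Dict.getD_counter s (a, b)
  have houter : PySem.Set.ofList ((PySem.Dict.counter s).items.map (fun q => q.1.1)) =
      PySem.Set.ofList (s.map (fun k => k.1)) := by
    rw [PySem.Dict.items_counter, List.map_map]
    exact pv_ofList_map_ofList _ s
  have hfl : ∀ a : String,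
      ((PySem.Dict.counter s).items.filter (fun q => q.1.1 == a)).map (fun q => q.1.2) = pvBs s a := by
    intro a
    rw [PySem.Dict.items_counter, List.filter_map, List.map_map]
    rfl
  rw [houter]
  unfold pvG
  apply pvMk_congr
  intro a _
  rw [hfl a]
  unfold pvInner
  apply pvMk_congr
  intro b _
  exact (hval a b).symm

-- ===== VERDICT (by name: the statement is the Claim_ definition above) =====
theorem trackfunc_spec : Claim_equal_trackfunc := by
  intro new_words size _ _
  unfold Spec_trackfunc
  rw [pv_trackfunc_eq_stream, pv_trackfunc_alt_eq_stream, pv_main]
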